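-- pv_equiv track=rewrite | github.com/arturgesiarz/Graph_Algorithms | lab01/ex1_bfs_dfs.py | create_tab
-- ===== SOURCE A (Python) =====
-- def create_tab(graph): #function that creates an array that will store information about specific edges
--     n=len(graph)
--     tab=[]
--     for v in range(n): #O(V^2)
--         neighs=len(graph[v])
--         for i in range(neighs):
--             cost=graph[v][i][1]
--             if not cost in tab: tab.append(cost) #O(V)
--     tab.sort()
--     return tab
-- ===== SOURCE B (Python) =====
-- def create_tab(graph):
--     # Collect every edge cost (no membership test), sort, then one linear
--     # pass keeping a cost only when it differs from the last kept value.
--     costs = []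
--     for row in graph:
--         for e in row:
--             costs.append(e[1])
--     costs.sort()
--     out = []
--     last = None
--     for c in costs:
--         if last is None or c != last:
--             out.append(c)
--             last = c
--     return out
-- ===== Notes on version B (the rewrite author's own statement) =====
-- stated objective: alternative
-- what changed: A dedups by scanning the accumulator for each edge cost and sorts at the end; B appends all costs unconditionally, sorts once, and removes duplicates in a single adjacent-comparison pass tracking the last kept value.
import Mathlib
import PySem

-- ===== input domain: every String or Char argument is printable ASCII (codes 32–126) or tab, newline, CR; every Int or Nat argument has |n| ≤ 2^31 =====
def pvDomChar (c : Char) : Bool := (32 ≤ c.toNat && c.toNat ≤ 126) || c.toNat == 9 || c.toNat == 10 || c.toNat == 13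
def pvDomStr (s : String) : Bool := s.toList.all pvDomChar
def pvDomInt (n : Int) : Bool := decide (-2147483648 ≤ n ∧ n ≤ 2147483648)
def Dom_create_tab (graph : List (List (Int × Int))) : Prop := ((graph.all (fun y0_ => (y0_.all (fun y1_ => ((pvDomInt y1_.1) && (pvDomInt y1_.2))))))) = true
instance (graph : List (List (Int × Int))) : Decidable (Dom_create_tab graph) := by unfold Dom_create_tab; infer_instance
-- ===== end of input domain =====

-- B collects all edge costs, sorts once, and removes duplicates in a single
-- adjacent-comparison pass, instead of A's per-cost membership scan (alternative algorithm).

-- ===== PORT A =====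
-- A: scan accumulator for each cost, append if absent, sort at the end.
def create_tab (graph : List (List (Int × Int))) : List Int :=
  let tab := graph.foldl
    (fun tab row => row.foldl
      (fun tab p => if p.2 ∈ tab then tab else tab ++ [p.2]) tab) []
  PySem.List.sorted tab (fun x => x) false

-- ===== PORT B =====
-- B's dedup loop: keep a cost only when it differs from the last kept value.
def dedupPass : List Int → List Int → Option Int → List Int
  | [], out, _ => out
  | c :: rest, out, last =>
      if last = some c then dedupPass rest out last
      else dedupPass rest (out ++ [c]) (some c)

def create_tab_alt (graph : List (List (Int × Int))) : List Int :=
  let costs := graph.foldl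
    (fun acc row => row.foldl (fun acc p => acc ++ [p.2]) acc) []
  dedupPass (PySem.List.sorted costs (fun x => x) false) [] none

-- ===== PRECONDITION & SPEC =====
def Spec_create_tab (graph : List (List (Int × Int))) (out : List Int) : Prop := out = create_tab_alt graph
instance (graph : List (List (Int × Int))) (out : List Int) : Decidable (Spec_create_tab graph out) := by unfold Spec_create_tab; infer_instance

-- ===== CLAIM (what is proved, stated in full; the proofs are below) =====
def Claim_equal_create_tab : Prop := ∀ (graph : List (List (Int × Int))), Dom_create_tab graph → Spec_create_tab graph (create_tab graph)

-- ===== LEMMAS AND PROOFS =====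

-- the flat list of all edge costs, row by row
def flatCosts (graph : List (List (Int × Int))) : List Int :=
  (graph.map (fun row => row.map Prod.snd)).flatten

-- A's nested loop is the dedup fold over the flat cost list
theorem foldA_flat (graph : List (List (Int × Int))) (tab : List Int) :
    graph.foldl (fun tab row => row.foldl
        (fun tab p => if p.2 ∈ tab then tab else tab ++ [p.2]) tab) tab
      = (flatCosts graph).foldl
          (fun tab c => if c ∈ tab then tab else tab ++ [c]) tab := by
  induction graph generalizing tab with
  | nil => simp [flatCosts]
  | cons row rest ih =>
      simp only [List.foldl_cons, flatCosts, List.map_cons, List.flatten_cons,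
        List.foldl_append, ih, List.foldl_map]

-- B's nested loop appends the flat cost list
theorem foldB_flat (graph : List (List (Int × Int))) (acc : List Int) :
    graph.foldl (fun acc row => row.foldl (fun acc p => acc ++ [p.2]) acc) acc
      = acc ++ flatCosts graph := by
  induction graph generalizing acc with
  | nil => simp [flatCosts]
  | cons row rest ih =>
      have hrow : ∀ (a : List Int),
          row.foldl (fun acc p => acc ++ [p.2]) a = a ++ row.map Prod.snd := by
        intro a
        induction row generalizing a with
        | nil => simp
        | cons p t iht => simp [iht]
      rw [List.foldl_cons, hrow, ih]
      simp [flatCosts, List.append_assoc]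

-- the dedup fold keeps the accumulator Nodup and collects exactly the members
theorem foldA_nodup_mem (xs : List Int) : ∀ (tab : List Int), tab.Nodup →
    (xs.foldl (fun tab c => if c ∈ tab then tab else tab ++ [c]) tab).Nodup ∧
    ∀ c, c ∈ xs.foldl (fun tab c => if c ∈ tab then tab else tab ++ [c]) tab
        ↔ c ∈ tab ∨ c ∈ xs := by
  induction xs with
  | nil => intro tab h; simpa using h
  | cons x rest ih =>
      intro tab h
      simp only [List.foldl_cons]
      by_cases hx : x ∈ tab
      · simp only [if_pos hx]
        obtain ⟨h1, h2⟩ := ih tab h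
        refine ⟨h1, fun c => ?_⟩
        rw [h2 c]
        constructor
        · rintro (hc | hc)
          · exact Or.inl hc
          · exact Or.inr (List.mem_cons_of_mem _ hc)
        · rintro (hc | hc)
          · exact Or.inl hc
          · rcases List.mem_cons.mp hc with rfl | hc
            · exact Or.inl hx
            · exact Or.inr hc
      · simp only [if_neg hx]
        have hnd : (tab ++ [x]).Nodup := by
          simp only [List.nodup_append, List.nodup_singleton, true_and, List.mem_singleton]
          exact ⟨h, by simpa [List.disjoint_singleton] using fun a ha (he : a = x) => hx (he ▸ ha)⟩
        obtain ⟨h1, h2⟩ := ih (tab ++ [x]) hnd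
        refine ⟨h1, fun c => ?_⟩
        rw [h2 c]
        simp only [List.mem_append, List.mem_cons]
        tauto

-- B's adjacent-dedup pass on a sorted list: strictly increasing, same members
theorem dedupPass_spec (s : List Int) : ∀ (out : List Int) (last : Option Int),
    s.Pairwise (· ≤ ·) →
    out.Pairwise (· < ·) →
    (∀ x ∈ s, ∀ y ∈ out, y ≤ x) →
    (match last with
      | none => out = []
      | some v => v ∈ out ∧ ∀ y ∈ out, y ≤ v) →
    (dedupPass s out last).Pairwise (· < ·) ∧
    ∀ c, c ∈ dedupPass s out last ↔ c ∈ out ∨ c ∈ s := by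
  induction s with
  | nil => intro out last _ h2 _ _; exact ⟨h2, by simp [dedupPass]⟩
  | cons c rest ih =>
      intro out last h1 h2 h3 h4
      have hrest : rest.Pairwise (· ≤ ·) := (List.pairwise_cons.mp h1).2
      have hc_le : ∀ x ∈ rest, c ≤ x := (List.pairwise_cons.mp h1).1
      by_cases hl : last = some c
      · subst hl
        obtain ⟨hcmem, hmax⟩ := h4
        simp only [dedupPass, if_pos]
        obtain ⟨g1, g2⟩ := ih out (some c) hrest h2
          (fun x hx y hy => h3 x (List.mem_cons_of_mem _ hx) y hy) ⟨hcmem, hmax⟩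
        refine ⟨g1, fun d => ?_⟩
        rw [g2 d]
        constructor
        · rintro (h | h)
          · exact Or.inl h
          · exact Or.inr (List.mem_cons_of_mem _ h)
        · rintro (h | h)
          · exact Or.inl h
          · rcases List.mem_cons.mp h with rfl | h
            · exact Or.inl hcmem
            · exact Or.inr h
      · simp only [dedupPass, if_neg hl]
        have hlt : ∀ y ∈ out, y < c := by
          intro y hy
          have hle : y ≤ c := h3 c (List.mem_cons_self ..) y hy
          rcases lt_or_eq_of_le hle with h | rfl
          · exact h
          · -- y = c ∈ out: then last's max v satisfies v = c, contradiction
            cases last with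
            | none => rw [h4] at hy; exact absurd hy (List.not_mem_nil)
            | some v =>
                obtain ⟨hvmem, hvmax⟩ := h4
                have h5 : v ≤ y := h3 y (List.mem_cons_self ..) v hvmem
                have h6 : y ≤ v := hvmax y hy
                exact absurd (congrArg some (le_antisymm h5 h6)) hl
        have hout' : (out ++ [c]).Pairwise (· < ·) := by
          refine List.pairwise_append.mpr ⟨h2, List.pairwise_singleton .., ?_⟩
          intro y hy z hz
          rcases List.mem_singleton.mp hz with rfl
          exact hlt y hy
        obtain ⟨g1, g2⟩ := ih (out ++ [c]) (some c) hrest hout'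
          (by
            intro x hx y hy
            rcases List.mem_append.mp hy with hy | hy
            · exact h3 x (List.mem_cons_of_mem _ hx) y hy
            · rcases List.mem_singleton.mp hy with rfl
              exact hc_le x hx)
          ⟨List.mem_append.mpr (Or.inr (List.mem_singleton.mpr rfl)),
            by
              intro y hy
              rcases List.mem_append.mp hy with hy | hy
              · exact le_of_lt (hlt y hy)
              · rcases List.mem_singleton.mp hy with rfl; exact le_rfl⟩
        refine ⟨g1, fun d => ?_⟩
        rw [g2 d]
        simp only [List.mem_append, List.mem_cons]
        tauto

-- ===== VERDICT (by name: the statement is the Claim_ definition above) =====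
theorem create_tab_spec : Claim_equal_create_tab := by
  intro graph _
  unfold Spec_create_tab create_tab create_tab_alt
  simp only [foldA_flat, foldB_flat, List.nil_append]
  set L := flatCosts graph with hL
  set s := PySem.List.sorted L (fun x => x) false with hs
  have hsorted : s.Pairwise (· ≤ ·) := PySem.List.sorted_pairwise ..
  have hmem_s : ∀ x, x ∈ s ↔ x ∈ L := fun x => PySem.List.mem_sorted ..
  obtain ⟨hRlt, hRmem⟩ := dedupPass_spec s [] none hsorted (by simp)
    (by simp) (by simp)
  obtain ⟨hTnd, hTmem⟩ := foldA_nodup_mem L [] (by simp)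
  set R := dedupPass s [] none with hR
  set T := L.foldl (fun tab c => if c ∈ tab then tab else tab ++ [c]) [] with hT
  have hRnd : R.Nodup := hRlt.imp ne_of_lt
  have hperm : R.Perm T := by
    rw [List.perm_ext_iff_of_nodup hRnd hTnd]
    intro a
    simp [hRmem, hTmem, hmem_s]
  exact PySem.List.sorted_eq_of_perm_of_pairwise_lt T R (fun x => x) hperm hRlt
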